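-- pv_equiv track=rewrite | github.com/symplicial/splitutils | worst_viable_run/optimize.py | makeBounds
-- ===== SOURCE A (Python) =====
-- def bestSegments(trials):
--   best = [9999999999999] * len(trials)
--   for i in range(0, len(trials)):
--     trial = trials[i]
--     for time in trial:
--       if time < best[i]:
--         best[i] = time
--   return best
--
-- def makeBounds(trials, target):
--   # Lower bound is sum of best and upper bound is the target time minus the sum of best for all following segments.
--   best = bestSegments(trials)
--   bounds = []
--   for i in range(0, len(trials) - 1):
--     lowerBound = 0
--     for j in range(0, i + 1):
--       lowerBound += best[j]
--     upperBound = target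
--     for j in range(i + 1, len(trials)):
--       upperBound -= best[j]
--     bounds.append((lowerBound, upperBound))
--   return bounds
-- ===== SOURCE B (Python) =====
-- BIG = 9999999999999
--
-- def makeBounds(trials, target):
--     # One pass: a running prefix sum and the precomputed total replace the per-segment prefix/suffix re-summations.
--     best = [min(trial, default=BIG) for trial in trials]
--     total = sum(best)
--     bounds = []
--     prefix = 0
--     for b in best[:-1]:
--         prefix += b
--         bounds.append((prefix, target - total + prefix))
--     return bounds
-- ===== Notes on version B (the rewrite author's own statement) =====
-- stated objective: faster
-- what changed: Replaces the per-segment inner loops that re-sum the prefix and suffix of best with a single pass keeping a running prefix sum and the precomputed total (upper bound = target - total + prefix).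
import Mathlib
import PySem

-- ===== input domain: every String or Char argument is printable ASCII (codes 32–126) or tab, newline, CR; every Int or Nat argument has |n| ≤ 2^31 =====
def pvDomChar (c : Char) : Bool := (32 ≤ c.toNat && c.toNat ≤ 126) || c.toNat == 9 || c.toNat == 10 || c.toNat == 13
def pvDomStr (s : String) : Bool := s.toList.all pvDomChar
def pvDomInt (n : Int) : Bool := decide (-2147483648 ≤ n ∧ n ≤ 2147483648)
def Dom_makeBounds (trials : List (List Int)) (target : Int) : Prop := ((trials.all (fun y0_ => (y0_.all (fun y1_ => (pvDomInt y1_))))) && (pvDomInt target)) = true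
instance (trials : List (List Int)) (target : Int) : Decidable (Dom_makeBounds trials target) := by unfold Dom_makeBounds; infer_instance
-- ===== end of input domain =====

-- B replaces A's per-segment prefix/suffix re-summations with one pass keeping a running
-- prefix sum and the precomputed total; equal on all Dom inputs (A is total).

-- ===== PORT A =====
-- literal port of bestSegments: best = [BIG]*len, nested loops updating best[i] in place
def bestSegments (trials : List (List Int)) : List Int :=
  (PySem.List.pyRange 0 (trials.length : Int) 1).foldl
    (fun best i =>
      let trial := PySem.List.pyGetD trials i []
      trial.foldl
        (fun b time =>
          if time < PySem.List.pyGetD b i 0 then PySem.List.pySetD b i time else b)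
        best)
    (List.replicate trials.length 9999999999999)

def makeBounds (trials : List (List Int)) (target : Int) : List (Int × Int) :=
  let best := bestSegments trials
  (PySem.List.pyRange 0 ((trials.length : Int) - 1) 1).foldl
    (fun bounds i =>
      let lowerBound :=
        (PySem.List.pyRange 0 (i + 1) 1).foldl
          (fun lb j => lb + PySem.List.pyGetD best j 0) 0
      let upperBound :=
        (PySem.List.pyRange (i + 1) (trials.length : Int) 1).foldl
          (fun ub j => ub - PySem.List.pyGetD best j 0) target
      bounds ++ [(lowerBound, upperBound)])
    []

-- ===== PORT B =====
def makeBounds_alt (trials : List (List Int)) (target : Int) : List (Int × Int) :=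
  let best := trials.map (fun trial => (PySem.List.min? trial (fun x => x)).getD 9999999999999)
  let total := best.sum
  ((PySem.List.slice best none (some (-1))).foldl
    (fun (st : Int × List (Int × Int)) b =>
      (st.1 + b, st.2 ++ [(st.1 + b, target - total + (st.1 + b))]))
    (0, [])).2

-- ===== PRECONDITION & SPEC =====
def Spec_makeBounds (trials : List (List Int)) (target : Int) (out : List (Int × Int)) : Prop := out = makeBounds_alt trials target
instance (trials : List (List Int)) (target : Int) (out : List (Int × Int)) : Decidable (Spec_makeBounds trials target out) := by unfold Spec_makeBounds; infer_instance

-- ===== CLAIM (what is proved, stated in full; the proofs are below) =====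
def Claim_equal_makeBounds : Prop := ∀ (trials : List (List Int)) (target : Int), Dom_makeBounds trials target → Spec_makeBounds trials target (makeBounds trials target)

-- ===== LEMMAS AND PROOFS =====


-- helper: fold of Python's "if time < x: x = time" over a trial
def foldMin (t : List Int) (x : Int) : Int := t.foldl (fun x time => if time < x then time else x) x

lemma foldMin_eq_foldl_min (t : List Int) : ∀ (x : Int), foldMin t x = t.foldl min x := by
  induction t with
  | nil => intro x; simp [foldMin]
  | cons a t ih =>
    intro x
    simp only [foldMin, List.foldl_cons] at ih ⊢
    rw [show (if a < x then a else x) = min x a from by rw [min_def]; split_ifs <;> omega]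
    exact ih (min x a)

-- A's sentinel fold equals Python's min(trial, default=BIG) when every element is small
lemma foldMin_eq_min? (t : List Int) (hb : ∀ y ∈ t, y ≤ 2147483648) :
    foldMin t 9999999999999 = (PySem.List.min? t (fun x => x)).getD 9999999999999 := by
  cases t with
  | nil =>
    rw [(PySem.List.min?_eq_none_iff _ _).mpr rfl]
    simp [foldMin]
  | cons a t' =>
    rw [PySem.List.min?_id_cons, Option.getD_some, foldMin_eq_foldl_min, List.foldl_cons]
    rw [min_eq_right (by have := hb a (by simp); omega)]

-- the inner Python loop sets best[i] to foldMin of the trial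
lemma inner_fold (t : List Int) : ∀ (b : List Int) (i : Nat), i < b.length →
    t.foldl (fun b time => if time < b.getD i 0 then b.set i time else b) b
      = b.set i (foldMin t (b.getD i 0)) := by
  induction t with
  | nil =>
    intro b i hi
    simp only [List.foldl_nil, foldMin]
    rw [List.getD_eq_getElem _ _ hi, List.set_getElem_self]
  | cons a t ih =>
    intro b i hi
    simp only [List.foldl_cons]
    by_cases h : a < b.getD i 0
    · rw [if_pos h, ih (b.set i a) i (by simpa using hi), List.set_set]
      have hg : (b.set i a).getD i 0 = a := by
        rw [List.getD_eq_getElem _ _ (by simpa using hi)]; simp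
      rw [hg]
      simp only [foldMin, List.foldl_cons, if_pos h]
    · rw [if_neg h, ih b i hi]
      simp only [foldMin, List.foldl_cons, if_neg h]

-- the outer loop of bestSegments, from index k on
lemma outer_fold (trials : List (List Int)) : ∀ (d k : Nat) (s : List Int),
    trials.length - k = d → s.length = trials.length →
    (PySem.List.pyRange ((k : Nat) : Int) ((trials.length : Nat) : Int) 1).foldl
      (fun best i =>
        let trial := PySem.List.pyGetD trials i []
        trial.foldl
          (fun b time =>
            if time < PySem.List.pyGetD b i 0 then PySem.List.pySetD b i time else b)
          best)
      s
    = s.take k ++ ((trials.drop k).zip (s.drop k)).map (fun p => foldMin p.1 p.2) := by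
  intro d
  induction d with
  | zero =>
    intro k s hd hs
    have hk : trials.length ≤ k := by omega
    rw [PySem.List.pyRange_one_eq_nil (by exact_mod_cast hk)]
    rw [List.drop_eq_nil_of_le hk, List.take_of_length_le (by omega)]
    simp
  | succ d ih =>
    intro k s hd hs
    have hk : k < trials.length := by omega
    rw [PySem.List.pyRange_one_cons (by exact_mod_cast hk)]
    rw [List.foldl_cons]
    have hks : k < s.length := by omega
    simp only [PySem.List.pyGetD_natCast, PySem.List.pySetD_natCast]
    rw [inner_fold _ s k hks]
    have hcast : ((k : Int) + 1) = (((k + 1 : Nat) : Nat) : Int) := by omega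
    rw [hcast, ih (k + 1) _ (by omega) (by simpa using hs)]
    -- rewrite take/drop of the set list
    have htake : (s.set k (foldMin (trials.getD k []) (s.getD k 0))).take (k + 1)
        = s.take k ++ [foldMin (trials.getD k []) (s.getD k 0)] := by
      rw [List.take_set]
      rw [List.take_add_one]
      rw [List.getElem?_eq_getElem hks]
      rw [List.set_append_right _ _ (by simp [List.length_take])]
      simp [List.length_take, Nat.min_eq_left (le_of_lt hks)]
    have hdrop : (s.set k (foldMin (trials.getD k []) (s.getD k 0))).drop (k + 1) = s.drop (k + 1) := by
      rw [List.drop_set]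
      simp
    rw [htake, hdrop]
    have hdt : trials.drop k = trials.getD k [] :: trials.drop (k + 1) := by
      rw [List.getD_eq_getElem _ _ hk]
      exact List.drop_eq_getElem_cons hk
    have hds : s.drop k = s.getD k 0 :: s.drop (k + 1) := by
      rw [List.getD_eq_getElem _ _ hks]
      exact List.drop_eq_getElem_cons hks
    rw [hdt, hds]
    simp [List.zip_cons_cons]

lemma zip_map_foldMin (ts : List (List Int)) :
    ((ts.zip (List.replicate ts.length (9999999999999 : Int))).map (fun p => foldMin p.1 p.2))
    = ts.map (fun t => foldMin t 9999999999999) := by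
  induction ts with
  | nil => simp
  | cons a ts ih => simp [List.replicate_succ, ih]

lemma bestSegments_eq (trials : List (List Int)) (hb : ∀ t ∈ trials, ∀ y ∈ t, y ≤ 2147483648) :
    bestSegments trials
      = trials.map (fun trial => (PySem.List.min? trial (fun x => x)).getD 9999999999999) := by
  unfold bestSegments
  have h := outer_fold trials trials.length 0 (List.replicate trials.length 9999999999999)
      (by omega) (by simp)
  simp only [Nat.cast_zero, List.take_zero, List.drop_zero, List.nil_append] at h
  rw [h, zip_map_foldMin]
  exact List.map_congr_left (fun t ht => foldMin_eq_min? t (hb t ht))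

-- A's lower-bound inner loop is a prefix sum
lemma lower_sum (best : List Int) : ∀ (k : Nat), k ≤ best.length →
    (PySem.List.pyRange 0 ((k : Nat) : Int) 1).foldl
      (fun lb j => lb + PySem.List.pyGetD best j 0) 0 = (best.take k).sum := by
  intro k
  induction k with
  | zero => intro _; simp [PySem.List.pyRange_one_eq_nil]
  | succ k ih =>
    intro hk
    have hc : (((k + 1 : Nat) : Nat) : Int) = ((k : Nat) : Int) + 1 := by omega
    rw [hc, PySem.List.pyRange_one_succ_right (by positivity)]
    rw [List.foldl_append, ih (by omega)]
    simp only [List.foldl_cons, List.foldl_nil, PySem.List.pyGetD_natCast]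
    rw [List.sum_take_succ _ _ (by omega), List.getD_eq_getElem _ _ (by omega)]

lemma foldl_sub_eq (l : List Int) : ∀ (init : Int), l.foldl (fun a b => a - b) init = init - l.sum := by
  induction l with
  | nil => intro init; simp
  | cons a l ih => intro init; simp [ih]; ring

-- B's loop produces the prefix-sum pairs
lemma b_loop (C : Int) (l : List Int) : ∀ (p0 : Int) (acc : List (Int × Int)),
    (l.foldl (fun (st : Int × List (Int × Int)) b =>
        (st.1 + b, st.2 ++ [(st.1 + b, C + (st.1 + b))])) (p0, acc))
    = (p0 + l.sum,
       acc ++ (List.range l.length).map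
         (fun k => (p0 + (l.take (k + 1)).sum, C + (p0 + (l.take (k + 1)).sum)))) := by
  induction l with
  | nil => intro p0 acc; simp
  | cons b l ih =>
    intro p0 acc
    simp only [List.foldl_cons]
    rw [ih]
    refine Prod.ext ?_ ?_
    · simp [List.sum_cons]; ring
    · simp only [List.length_cons, List.range_succ_eq_map, List.map_cons, List.map_map]
      rw [List.append_assoc, List.singleton_append]
      congr 1
      congr 1
      · simp
      · refine List.map_congr_left (fun k hk => ?_)
        simp only [Function.comp_apply, List.take_succ_cons, List.sum_cons]
        exact Prod.ext (by ring) (by ring)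

lemma sum_take_drop' (best : List Int) (k : Nat) :
    (best.take k).sum + (best.drop k).sum = best.sum := by
  rw [← List.sum_append, List.take_append_drop]

theorem makeBounds_spec : Claim_equal_makeBounds := by
  unfold Claim_equal_makeBounds
  intro trials target hdom
  unfold Spec_makeBounds
  have hb : ∀ t ∈ trials, ∀ y ∈ t, y ≤ 2147483648 := by
    unfold Dom_makeBounds at hdom
    simp only [Bool.and_eq_true, List.all_eq_true, pvDomInt, decide_eq_true_eq] at hdom
    intro t ht y hy
    exact (hdom.1 t ht y hy).2
  simp only [makeBounds, makeBounds_alt]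
  rw [bestSegments_eq trials hb]
  set best := trials.map (fun trial => (PySem.List.min? trial (fun x => x)).getD 9999999999999)
    with hbest
  have hlen : best.length = trials.length := by simp [hbest]
  rw [PySem.List.foldl_append_singleton_eq_map, PySem.List.slice_to_neg_one,
    b_loop (target - best.sum) best.dropLast 0 []]
  simp only [List.nil_append]
  cases hn : trials.length with
  | zero =>
    have : trials = [] := List.length_eq_zero_iff.mp hn
    subst this
    simp [PySem.List.pyRange_one_eq_nil, hbest]
  | succ m =>
    have hm1 : (((m + 1 : Nat) : Nat) : Int) - 1 = ((m : Nat) : Int) := by omega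
    rw [hm1, PySem.List.pyRange_zero_natCast, List.map_map]
    have hdl : best.dropLast.length = m := by
      rw [List.length_dropLast, hlen, hn]
      omega
    rw [hdl]
    refine List.map_congr_left (fun k hk => ?_)
    have hkm : k < m := List.mem_range.mp hk
    simp only [Function.comp_apply]
    have hc1 : ((k : Nat) : Int) + 1 = (((k + 1 : Nat) : Nat) : Int) := by omega
    refine Prod.ext ?_ ?_
    · -- lower bound component
      rw [hc1, lower_sum best (k + 1) (by omega)]
      have : best.dropLast.take (k + 1) = best.take (k + 1) := by
        rw [List.dropLast_eq_take, List.take_take]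
        congr 1
        omega
      simp [this]
    · -- upper bound component
      have hlenb : (((m + 1 : Nat) : Nat) : Int) = PySem.List.len best := by
        simp [PySem.List.len, hlen, hn]
      rw [hlenb, PySem.List.foldl_pyRange_pyGetD best 0 (fun a b => a - b) target
        (by positivity), foldl_sub_eq]
      have ht : ((k : Int) + 1).toNat = k + 1 := by omega
      rw [ht]
      have hsum := sum_take_drop' best (k + 1)
      have : best.dropLast.take (k + 1) = best.take (k + 1) := by
        rw [List.dropLast_eq_take, List.take_take]
        congr 1
        omega
      simp [this]
      omega
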